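-- pv_equiv track=rewrite | github.com/hrQAQ/wordle | XGBOOST.py | get_cust_age_stage
-- ===== SOURCE A (Python) =====
-- def get_cust_age_stage(birth_year):
--     """根据出生年份获取年龄段"""
--     age_stage = []
--     for i in range(len(birth_year)):
--         if int(birth_year[i]) == 0:
--             age_stage.append("未知")
--         elif int(birth_year[i]) < 1960:
--             age_stage.append("60前")
--         elif int(birth_year[i]) < 1970:
--             age_stage.append("60后")
--         elif int(birth_year[i]) < 1980:
--             age_stage.append("70后")
--         elif int(birth_year[i]) < 1990:
--             age_stage.append("80后")
--         elif int(birth_year[i]) < 2000: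
--             age_stage.append("90后")
--         elif int(birth_year[i]) >= 2000:
--             age_stage.append("00后")
--         else:
--             age_stage.append("未知")
--     return age_stage
-- ===== SOURCE B (Python) =====
-- BOUNDS = [1960, 1970, 1980, 1990, 2000]
-- LABELS = ["60前", "60后", "70后", "80后", "90后", "00后"]
--
-- def get_cust_age_stage(birth_year):
--     """根据出生年份获取年龄段 (table-driven)"""
--     return ["未知" if int(y) == 0 else LABELS[sum(int(y) >= b for b in BOUNDS)]
--             for y in birth_year]
-- ===== Notes on version B (the rewrite author's own statement) =====
-- stated objective: idiomatic
-- what changed: Replaces the six-branch comparison ladder with a sorted threshold table and a parallel label table: the bucket index is computed by counting thresholds <= the year and used to index the label list, in a single comprehension.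
import Mathlib
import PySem

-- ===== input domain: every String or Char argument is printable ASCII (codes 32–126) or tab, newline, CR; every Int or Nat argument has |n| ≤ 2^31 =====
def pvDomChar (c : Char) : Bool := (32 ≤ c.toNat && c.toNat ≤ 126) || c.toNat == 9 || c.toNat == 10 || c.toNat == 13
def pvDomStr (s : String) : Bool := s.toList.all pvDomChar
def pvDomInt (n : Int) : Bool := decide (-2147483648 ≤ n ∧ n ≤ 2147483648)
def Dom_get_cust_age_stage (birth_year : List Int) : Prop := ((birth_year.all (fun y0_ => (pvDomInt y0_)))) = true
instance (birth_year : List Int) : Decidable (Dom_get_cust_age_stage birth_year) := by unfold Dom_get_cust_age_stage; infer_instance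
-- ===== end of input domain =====

-- B replaces A's six-branch comparison ladder by a threshold/label table lookup; return value only, no side effects.

-- ===== PORT A =====
-- for i in range(len(birth_year)): the if/elif ladder, appending to age_stage
def get_cust_age_stage (birth_year : List Int) : List String :=
  (PySem.List.pyRange 0 birth_year.length 1).foldl
    (fun acc i =>
      let y := PySem.List.pyGetD birth_year i 0
      if y = 0 then acc ++ ["未知"]
      else if y < 1960 then acc ++ ["60前"]
      else if y < 1970 then acc ++ ["60后"]
      else if y < 1980 then acc ++ ["70后"]
      else if y < 1990 then acc ++ ["80后"]
      else if y < 2000 then acc ++ ["90后"]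
      else if y ≥ 2000 then acc ++ ["00后"]
      else acc ++ ["未知"]) []

-- ===== PORT B =====
def pvBounds : List Int := [1960, 1970, 1980, 1990, 2000]
def pvLabels : List String := ["60前", "60后", "70后", "80后", "90后", "00后"]

-- list comprehension: "未知" if y == 0 else LABELS[sum(y >= b for b in BOUNDS)]
def get_cust_age_stage_alt (birth_year : List Int) : List String :=
  birth_year.map (fun y =>
    if y = 0 then "未知"
    else pvLabels.getD (pvBounds.countP (fun b => decide (y ≥ b))) "")

-- ===== PRECONDITION & SPEC =====
def Spec_get_cust_age_stage (birth_year : List Int) (out : List String) : Prop := out = get_cust_age_stage_alt birth_year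
instance (birth_year : List Int) (out : List String) : Decidable (Spec_get_cust_age_stage birth_year out) := by unfold Spec_get_cust_age_stage; infer_instance

-- ===== CLAIM (what is proved, stated in full; the proofs are below) =====
def Claim_equal_get_cust_age_stage : Prop := ∀ (birth_year : List Int), Dom_get_cust_age_stage birth_year → Spec_get_cust_age_stage birth_year (get_cust_age_stage birth_year)

-- ===== LEMMAS AND PROOFS =====

-- pointwise agreement of the ladder with the table lookup
theorem pv_stage_eq (y : Int) :
    (if y = 0 then "未知"
     else if y < 1960 then "60前"
     else if y < 1970 then "60后"
     else if y < 1980 then "70后"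
     else if y < 1990 then "80后"
     else if y < 2000 then "90后"
     else if y ≥ 2000 then "00后"
     else "未知")
    = (if y = 0 then "未知"
       else pvLabels.getD (pvBounds.countP (fun b => decide (y ≥ b))) "") := by
  by_cases h0 : y = 0
  · simp [h0]
  · have hc : pvBounds.countP (fun b => decide (y ≥ b)) =
        (if y < 1960 then 0 else if y < 1970 then 1 else if y < 1980 then 2
         else if y < 1990 then 3 else if y < 2000 then 4 else 5) := by
      simp only [pvBounds, List.countP_cons, List.countP_nil, decide_eq_true_eq]
      split_ifs <;> omega
    rw [if_neg h0, if_neg h0, hc]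
    split_ifs <;> first | rfl | omega

theorem get_cust_age_stage_spec : Claim_equal_get_cust_age_stage := by
  intro birth_year _
  unfold Spec_get_cust_age_stage get_cust_age_stage get_cust_age_stage_alt
  have h : (PySem.List.pyRange 0 birth_year.length 1).foldl
      (fun acc i =>
        let y := PySem.List.pyGetD birth_year i 0
        if y = 0 then acc ++ ["未知"]
        else if y < 1960 then acc ++ ["60前"]
        else if y < 1970 then acc ++ ["60后"]
        else if y < 1980 then acc ++ ["70后"]
        else if y < 1990 then acc ++ ["80后"]
        else if y < 2000 then acc ++ ["90后"]
        else if y ≥ 2000 then acc ++ ["00后"]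
        else acc ++ ["未知"]) []
      = birth_year.foldl
      (fun acc y =>
        if y = 0 then acc ++ ["未知"]
        else if y < 1960 then acc ++ ["60前"]
        else if y < 1970 then acc ++ ["60后"]
        else if y < 1980 then acc ++ ["70后"]
        else if y < 1990 then acc ++ ["80后"]
        else if y < 2000 then acc ++ ["90后"]
        else if y ≥ 2000 then acc ++ ["00后"]
        else acc ++ ["未知"]) [] :=
    PySem.List.foldl_pyRange_zero_pyGetD birth_year 0
      (fun acc y =>
        if y = 0 then acc ++ ["未知"]
        else if y < 1960 then acc ++ ["60前"]
        else if y < 1970 then acc ++ ["60后"]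
        else if y < 1980 then acc ++ ["70后"]
        else if y < 1990 then acc ++ ["80后"]
        else if y < 2000 then acc ++ ["90后"]
        else if y ≥ 2000 then acc ++ ["00后"]
        else acc ++ ["未知"]) []
  rw [h]; clear h
  have hstep : ∀ (acc : List String) (y : Int),
      (if y = 0 then acc ++ ["未知"]
       else if y < 1960 then acc ++ ["60前"]
       else if y < 1970 then acc ++ ["60后"]
       else if y < 1980 then acc ++ ["70后"]
       else if y < 1990 then acc ++ ["80后"]
       else if y < 2000 then acc ++ ["90后"]
       else if y ≥ 2000 then acc ++ ["00后"]
       else acc ++ ["未知"])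
      = acc ++ [if y = 0 then "未知"
                else pvLabels.getD (pvBounds.countP (fun b => decide (y ≥ b))) ""] := by
    intro acc y
    rw [← pv_stage_eq y]
    split_ifs <;> rfl
  simp only [hstep]
  exact PySem.List.foldl_append_singleton_eq_map _ _ _
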